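-- pv_equiv track=rewrite | github.com/rol1510/AoC-2021 | day-04.py | last_bingo
-- ===== SOURCE A (Python) =====
-- def find(arr, e):
--     for i, a in enumerate(arr):
--         if a == e:
--             return i
--     return -1
--
-- def test_row(row):
--     for e in row:
--         if not e is None:
--             return False
--     return True
--
-- def test_rows(board):
--     for row in board:
--         if test_row(row) == True:
--             return True
--     return False
--
-- def test_columns(board):
--     piviot = list(zip(*board))
--     return test_rows(piviot)
--
-- def last_bingo(boards):
--     bingos = []
--     for i, board in enumerate(boards):
--         bingos.append(test_rows(board) or test_columns(board))
--
--     if sum(bingos) >= (len(bingos) - 1):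
--         return find(bingos, False)
--     else:
--         return -1
-- ===== SOURCE B (Python) =====
-- def _wins(board):
--     # Running column AND-mask: no transpose is ever built.  col_none[j] is True
--     # iff every row seen so far has None at position j (mask truncated by zip
--     # to the running minimum row length, matching zip(*board)).
--     row_win = False
--     col_none = None
--     for row in board:
--         flags = [e is None for e in row]
--         row_win = row_win or all(flags)
--         col_none = flags if col_none is None else [a and b for a, b in zip(col_none, flags)]
--     return row_win or (col_none is not None and any(col_none))
--
-- def last_bingo(boards):
--     losers = [i for i, b in enumerate(boards) if not _wins(b)]
--     return losers[0] if len(losers) == 1 else -1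
-- ===== Notes on version B (the rewrite author's own statement) =====
-- stated objective: alternative
-- what changed: Replaces the transpose-and-scan column test (zip(*board) then scanning each column) with a running AND-mask folded over the rows so no column list is ever materialized, and replaces A's boolean-flag list + sum + linear find by collecting the loser indices and returning the single one iff exactly one exists.
import Mathlib
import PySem

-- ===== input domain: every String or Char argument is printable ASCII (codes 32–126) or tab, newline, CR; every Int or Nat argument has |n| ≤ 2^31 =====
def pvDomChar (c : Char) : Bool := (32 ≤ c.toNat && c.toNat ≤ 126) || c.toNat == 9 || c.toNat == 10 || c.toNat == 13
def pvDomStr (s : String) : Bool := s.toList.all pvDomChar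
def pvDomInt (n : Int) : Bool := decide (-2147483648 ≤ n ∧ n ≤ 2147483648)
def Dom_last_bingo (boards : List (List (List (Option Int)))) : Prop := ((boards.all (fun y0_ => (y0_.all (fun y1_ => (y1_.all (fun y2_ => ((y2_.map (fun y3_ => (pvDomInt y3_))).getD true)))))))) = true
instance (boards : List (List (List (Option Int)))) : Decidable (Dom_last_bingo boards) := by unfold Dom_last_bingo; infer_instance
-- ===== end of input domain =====

-- B replaces the transpose-and-scan column test by a running AND-mask over the rows and the
-- flag-list/sum/find driver by collecting loser indices; objective: alternative decomposition.

-- ===== PORT A =====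

-- find(arr, e): first index with a == e, else -1
def pvFindAux (arr : List Bool) (e : Bool) (i : Int) : Int :=
  match arr with
  | [] => -1
  | a :: rest => if a = e then i else pvFindAux rest e (i + 1)

def pvFind (arr : List Bool) (e : Bool) : Int := pvFindAux arr e 0

-- test_row: returns False at the first non-None element, else True
def pvTestRow : List (Option Int) → Bool
  | [] => true
  | e :: rest => if e.isSome then false else pvTestRow rest

-- test_rows: True iff some row tests True
def pvTestRows : List (List (Option Int)) → Bool
  | [] => false
  | row :: rest => if pvTestRow row = true then true else pvTestRows rest

-- zip(*board): exact Python zip over the unpacked rows — truncates to the shortest row;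
-- zip of no lists is empty. Ported by hand, exact on all inputs.
def pvZipStar (ls : List (List (Option Int))) : List (List (Option Int)) :=
  match ls with
  | [] => []
  | [] :: _ => []
  | (x :: xs) :: rest =>
      if rest.any List.isEmpty then []
      else (x :: rest.map (fun r => r.headD none)) :: pvZipStar (xs :: rest.map (List.drop 1))
termination_by (ls.headD []).length
decreasing_by simp

def pvTestColumns (board : List (List (Option Int))) : Bool := pvTestRows (pvZipStar board)

def last_bingo (boards : List (List (List (Option Int)))) : Int :=
  let bingos := (PySem.List.enumerate boards).foldl
    (fun (bingos : List Bool) p => bingos ++ [pvTestRows p.2 || pvTestColumns p.2]) []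
  if (bingos.foldl (fun (s : Int) b => s + (if b then 1 else 0)) 0) ≥ ((bingos.length : Int) - 1) then
    pvFind bingos false
  else
    -1

-- ===== PORT B =====

-- [a and b for a, b in zip(col_none, flags)]
def pvZipAnd (c flags : List Bool) : List Bool := List.zipWith and c flags

-- _wins: one loop over the rows, keeping row_win and the running column AND-mask
def pvWins (board : List (List (Option Int))) : Bool :=
  let st := board.foldl
    (fun (st : Bool × Option (List Bool)) row =>
      let flags := row.map Option.isNone
      (st.1 || flags.all id,
       some (match st.2 with | none => flags | some c => pvZipAnd c flags)))
    (false, none)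
  st.1 || (match st.2 with | none => false | some c => c.any id)

def last_bingo_alt (boards : List (List (List (Option Int)))) : Int :=
  let losers := ((PySem.List.enumerate boards).filter (fun p => !(pvWins p.2))).map (·.1)
  if losers.length = 1 then losers.headD (-1) else -1

-- ===== PRECONDITION & SPEC =====
def Spec_last_bingo (boards : List (List (List (Option Int)))) (out : Int) : Prop := out = last_bingo_alt boards
instance (boards : List (List (List (Option Int)))) (out : Int) : Decidable (Spec_last_bingo boards out) := by unfold Spec_last_bingo; infer_instance

-- ===== CLAIM (what is proved, stated in full; the proofs are below) =====
def Claim_equal_last_bingo : Prop := ∀ (boards : List (List (List (Option Int)))), Dom_last_bingo boards → Spec_last_bingo boards (last_bingo boards)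

-- ===== LEMMAS AND PROOFS =====

theorem pvTestRow_eq_all (row : List (Option Int)) : pvTestRow row = row.all Option.isNone := by
  induction row with
  | nil => rfl
  | cons e rest ih => cases e <;> simp [pvTestRow, ih]

-- the mask fold starting from [] stays []
theorem mask_nil (rest : List (List (Option Int))) :
    rest.foldl (fun c row => pvZipAnd c (row.map Option.isNone)) [] = [] := by
  induction rest with
  | nil => rfl
  | cons r rs ih => simpa [pvZipAnd] using ih

-- the mask never grows
theorem mask_len_mono (rest : List (List (Option Int))) (init : List Bool) :
    (rest.foldl (fun c row => pvZipAnd c (row.map Option.isNone)) init).length ≤ init.length := by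
  induction rest generalizing init with
  | nil => simp
  | cons r rs ih =>
      calc (List.foldl _ (pvZipAnd init (r.map Option.isNone)) rs).length
          ≤ (pvZipAnd init (r.map Option.isNone)).length := ih _
        _ ≤ init.length := by simp [pvZipAnd]

-- the mask is no longer than any processed row
theorem mask_len_le_mem (rest : List (List (Option Int))) (init : List Bool)
    (r : List (Option Int)) (hr : r ∈ rest) :
    (rest.foldl (fun c row => pvZipAnd c (row.map Option.isNone)) init).length ≤ r.length := by
  obtain ⟨s, t, rfl⟩ := List.append_of_mem hr
  rw [List.foldl_append, List.foldl_cons]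
  calc (List.foldl _ (pvZipAnd _ (r.map Option.isNone)) t).length
      ≤ (pvZipAnd (List.foldl _ init s) (r.map Option.isNone)).length := mask_len_mono _ _
    _ ≤ r.length := by simp [pvZipAnd]

-- peeling the first column off the mask fold when every remaining row is nonempty
theorem mask_cons (rest : List (List (Option Int))) : ∀ (x : Bool) (xs : List Bool),
    (∀ r ∈ rest, r ≠ []) →
    rest.foldl (fun c row => pvZipAnd c (row.map Option.isNone)) (x :: xs)
      = (rest.foldl (fun b row => b && (row.headD none).isNone) x)
        :: (rest.map (List.drop 1)).foldl (fun c row => pvZipAnd c (row.map Option.isNone)) xs := by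
  induction rest with
  | nil => intro x xs _; rfl
  | cons r rs ih =>
      intro x xs hne
      obtain ⟨y, ys, rfl⟩ := List.exists_cons_of_ne_nil (hne r (by simp))
      have h' : ∀ r' ∈ rs, r' ≠ [] := fun r' hr' => hne r' (by simp [hr'])
      simp only [List.foldl_cons, pvZipAnd, List.map, List.zipWith]
      exact ih (x && y.isNone) (List.zipWith and xs (ys.map Option.isNone)) h'

-- the head-and fold is the conjunction over the rows
theorem foldl_and_eq (rest : List (List (Option Int))) : ∀ (x : Bool),
    rest.foldl (fun b row => b && (row.headD none).isNone) x
      = (x && rest.all (fun row => (row.headD none).isNone)) := by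
  induction rest with
  | nil => intro x; simp
  | cons r rs ih =>
      intro x
      simp only [List.foldl_cons, List.all_cons]
      rw [ih, Bool.and_assoc]

-- one unfolding step of test_rows, as a disjunction
theorem pvTestRows_cons (c : List (Option Int)) (cs : List (List (Option Int))) :
    pvTestRows (c :: cs) = (pvTestRow c || pvTestRows cs) := by
  by_cases h : pvTestRow c = true <;> simp [pvTestRows, h]

-- main column lemma: the AND-mask's any equals A's transpose-and-scan
theorem mask_eq_cols (r0 : List (Option Int)) : ∀ (rest : List (List (Option Int))),
    (rest.foldl (fun c row => pvZipAnd c (row.map Option.isNone)) (r0.map Option.isNone)).any id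
      = pvTestRows (pvZipStar (r0 :: rest)) := by
  induction r0 with
  | nil =>
      intro rest
      rw [pvZipStar]
      simp [mask_nil, pvTestRows]
  | cons x xs ih =>
      intro rest
      rw [pvZipStar]
      by_cases he : rest.any List.isEmpty = true
      · rw [if_pos he]
        obtain ⟨r, hr, hre⟩ := List.any_eq_true.1 he
        have hr0 : r = [] := by cases r <;> simp_all
        have hlen := mask_len_le_mem rest ((x :: xs).map Option.isNone) r hr
        rw [hr0] at hlen
        simp only [List.length_nil, Nat.le_zero, List.length_eq_zero_iff] at hlen
        rw [hlen]
        rfl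
      · rw [if_neg he]
        have hne : ∀ r ∈ rest, r ≠ [] := by
          intro r hr hcon
          exact he (List.any_eq_true.2 ⟨r, hr, by simp [hcon]⟩)
        rw [List.map_cons, mask_cons rest (Option.isNone x) (xs.map Option.isNone) hne]
        rw [List.any_cons, pvTestRows_cons, ih (rest.map (List.drop 1))]
        have hcol : pvTestRow (x :: rest.map (fun r => r.headD none))
            = (rest.foldl (fun b row => b && (row.headD none).isNone) (Option.isNone x)) := by
          rw [foldl_and_eq, pvTestRow_eq_all]
          simp [List.all_map, Function.comp_def]
        rw [hcol]
        rfl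

-- B's per-board test equals A's
-- pvWins's pair fold splits into its two independent component folds
theorem pvWins_fold (l : List (List (Option Int))) : ∀ (a : Bool) (b : Option (List Bool)),
    l.foldl (fun (st : Bool × Option (List Bool)) row =>
      let flags := row.map Option.isNone
      (st.1 || flags.all id,
       some (match st.2 with | none => flags | some c => pvZipAnd c flags))) (a, b)
    = (l.foldl (fun (b : Bool) row => b || (row.map Option.isNone).all id) a,
       l.foldl (fun (c : Option (List Bool)) row =>
          some (match c with
                | none => row.map Option.isNone
                | some c => pvZipAnd c (row.map Option.isNone))) b) := by
  induction l with
  | nil => intro a b; rfl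
  | cons x xs ih =>
      intro a b
      rw [List.foldl_cons, List.foldl_cons, List.foldl_cons]
      exact ih _ _

-- the row_win component is test_rows
theorem foldl_row (l : List (List (Option Int))) : ∀ (b : Bool),
    l.foldl (fun (b : Bool) row => b || (row.map Option.isNone).all id) b = (b || pvTestRows l) := by
  induction l with
  | nil => intro b; simp [pvTestRows]
  | cons r rs ih =>
      intro b
      rw [List.foldl_cons, ih, pvTestRows_cons, pvTestRow_eq_all]
      simp [Bool.or_assoc, List.all_map]

-- once the mask exists it stays a `some` of the plain mask fold
theorem foldl_col (l : List (List (Option Int))) : ∀ (m : List Bool),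
    l.foldl (fun (c : Option (List Bool)) row =>
        some (match c with
              | none => row.map Option.isNone
              | some c => pvZipAnd c (row.map Option.isNone))) (some m)
      = some (l.foldl (fun c row => pvZipAnd c (row.map Option.isNone)) m) := by
  induction l with
  | nil => intro m; rfl
  | cons r rs ih => intro m; rw [List.foldl_cons, List.foldl_cons, ih]

theorem pvWins_eq (board : List (List (Option Int))) :
    pvWins board = (pvTestRows board || pvTestColumns board) := by
  cases board with
  | nil => simp [pvWins, pvTestRows, pvTestColumns, pvZipStar]
  | cons r0 rs =>
      simp only [pvWins, pvWins_fold]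
      rw [List.foldl_cons, List.foldl_cons, foldl_row, foldl_col, pvTestColumns,
        ← mask_eq_cols r0 rs, pvTestRows_cons, pvTestRow_eq_all]
      simp [List.all_map]

-- A's loop builds the list of win flags
theorem foldA_eq_map (l : List (List (List (Option Int)))) : ∀ (s : Int) (acc : List Bool),
    (PySem.List.enumerate l s).foldl
      (fun (bingos : List Bool) p => bingos ++ [pvTestRows p.2 || pvTestColumns p.2]) acc
      = acc ++ l.map (fun b => pvTestRows b || pvTestColumns b) := by
  induction l with
  | nil => intro s acc; simp [PySem.List.enumerate_nil]
  | cons b rest ih =>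
      intro s acc
      rw [PySem.List.enumerate_cons, List.foldl_cons, ih]
      simp

-- count of True flags plus count of False flags is the length
theorem sum_add_countF (l : List Bool) : ∀ (s : Int),
    l.foldl (fun (s : Int) b => s + (if b then 1 else 0)) s
      + ((l.filter (fun b => !b)).length : Int) = s + l.length := by
  induction l with
  | nil => intro s; simp
  | cons b rest ih =>
      intro s
      cases b
      · have h := ih (s + 0)
        simp only [List.foldl_cons, List.filter_cons, Bool.not_false, reduceIte,
          List.length_cons]
        push_cast
        push_cast at h
        omega
      · have h := ih (s + 1)
        simp only [List.foldl_cons, List.filter_cons, Bool.not_true, reduceIte,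
          List.length_cons]
        push_cast
        push_cast at h
        omega

-- B's loser list has one index per False flag
theorem losers_len (l : List (List (List (Option Int)))) : ∀ (i : Int),
    (((PySem.List.enumerate l i).filter (fun p => !(pvWins p.2))).map (·.1)).length
      = ((l.map (fun b => pvTestRows b || pvTestColumns b)).filter (fun b => !b)).length := by
  induction l with
  | nil => intro i; simp [PySem.List.enumerate_nil]
  | cons b rest ih =>
      intro i
      rw [PySem.List.enumerate_cons, List.map_cons, List.filter_cons, List.filter_cons, pvWins_eq]
      cases hw : (pvTestRows b || pvTestColumns b) <;> simp [ih (i + 1)]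

-- the head of B's loser list is A's find
theorem losers_head (l : List (List (List (Option Int)))) : ∀ (i : Int),
    ((((PySem.List.enumerate l i).filter (fun p => !(pvWins p.2))).map (·.1)).headD (-1))
      = pvFindAux (l.map (fun b => pvTestRows b || pvTestColumns b)) false i := by
  induction l with
  | nil => intro i; simp [PySem.List.enumerate_nil, pvFindAux]
  | cons b rest ih =>
      intro i
      rw [PySem.List.enumerate_cons, List.map_cons, List.filter_cons, pvWins_eq]
      cases hw : (pvTestRows b || pvTestColumns b)
      · simp [pvFindAux]
      · simp only [Bool.not_true, Bool.false_eq_true, reduceIte]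
        rw [ih (i + 1), pvFindAux]
        simp

-- ===== VERDICT (by name: the statement is the Claim_ definition above) =====
theorem last_bingo_spec : Claim_equal_last_bingo := by
  intro boards _
  unfold Spec_last_bingo last_bingo last_bingo_alt
  rw [foldA_eq_map boards 0 []]
  simp only [List.nil_append]
  set flags := boards.map (fun b => pvTestRows b || pvTestColumns b) with hflags
  set L := ((PySem.List.enumerate boards 0).filter (fun p => !(pvWins p.2))).map (·.1) with hL
  have hlen : L.length = (flags.filter (fun b => !b)).length := losers_len boards 0
  have hhead : L.headD (-1) = pvFindAux flags false 0 := losers_head boards 0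
  have hsum := sum_add_countF flags 0
  set t := flags.foldl (fun (s : Int) b => s + (if b then 1 else 0)) 0 with ht
  by_cases hc : t ≥ (flags.length : Int) - 1
  · rw [if_pos hc]
    have hn : (flags.filter (fun b => !b)).length ≤ 1 := by omega
    rcases Nat.lt_or_ge (flags.filter (fun b => !b)).length 1 with h0 | h1
    · have h0' : (flags.filter (fun b => !b)).length = 0 := by omega
      have hL0 : L = [] := List.length_eq_zero_iff.1 (hlen.trans h0')
      rw [if_neg (by rw [hlen, h0']; omega)]
      rw [pvFind, ← hhead, hL0]
      rfl
    · have h1' : (flags.filter (fun b => !b)).length = 1 := by omega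
      rw [if_pos (hlen.trans h1'), hhead, pvFind]
  · rw [if_neg hc]
    have hn : 2 ≤ (flags.filter (fun b => !b)).length := by omega
    rw [if_neg (by omega)]
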